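-- pv_equiv track=rewrite | github.com/Cho-SangHyun/Algorithm-Study | 백준/1744-수 묶기.py | solution
-- ===== SOURCE A (Python) =====
-- def solution(n, nums):
--     positive, negative, zero = [], [], 0
--     answer = 0
--
--     for num in nums:
--         if num == 1:
--             answer += 1
--         elif num == 0:
--             zero += 1
--         elif num > 1:
--             positive.append(num)
--         else:
--             negative.append(num)
--
--     positive.sort()
--     negative.sort(reverse=True)
--
--     while positive:
--         if len(positive) == 1:
--             answer += positive.pop()
--         else:
--             answer += positive.pop() * positive.pop()
--
--     while negative:
--         if len(negative) == 1:
--             if zero: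
--                 negative.pop()
--                 zero -= 1
--                 continue
--             answer += negative.pop()
--         else:
--             answer += negative.pop() * negative.pop()
--
--     return answer
-- ===== SOURCE B (Python) =====
-- def solution(n, nums):
--     # single ascending sort; pair adjacent negatives walking from the left,
--     # pair adjacent values > 1 walking from the right, count ones
--     s = sorted(nums)
--     m = len(s)
--     total = 0
--     i = 0
--     while i + 1 < m and s[i + 1] < 0:
--         total += s[i] * s[i + 1]
--         i += 2
--     if i < m and s[i] < 0:
--         # lone leftover negative: a zero neutralises it, otherwise it is added
--         if 0 not in s:
--             total += s[i]
--         i += 1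
--     j = m - 1
--     while j - 1 >= i and s[j - 1] > 1:
--         total += s[j] * s[j - 1]
--         j -= 2
--     if j >= i and s[j] > 1:
--         total += s[j]
--     return total + s.count(1)
-- ===== Notes on version B (the rewrite author's own statement) =====
-- stated objective: simpler
-- what changed: Instead of bucketing into three lists and pop-draining two separately sorted buckets, B sorts the whole input once ascending and does two adjacent-pair sweeps over that single array (negatives from the left, values > 1 from the right), counting ones via count and neutralising a lone negative with a zero via membership.
import Mathlib
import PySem

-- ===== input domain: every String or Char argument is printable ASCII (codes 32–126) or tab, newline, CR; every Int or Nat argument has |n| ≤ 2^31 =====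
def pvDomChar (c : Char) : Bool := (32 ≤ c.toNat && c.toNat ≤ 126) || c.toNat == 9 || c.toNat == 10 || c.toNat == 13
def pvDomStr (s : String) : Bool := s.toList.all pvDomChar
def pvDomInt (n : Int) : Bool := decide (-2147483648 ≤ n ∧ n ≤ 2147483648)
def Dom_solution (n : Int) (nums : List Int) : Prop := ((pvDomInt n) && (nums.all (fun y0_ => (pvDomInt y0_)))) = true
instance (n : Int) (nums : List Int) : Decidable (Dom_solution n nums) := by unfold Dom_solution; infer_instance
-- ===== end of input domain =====

-- B replaces A's three pop-drained bucket lists by one ascending sort of the whole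
-- input walked with two adjacent-pair sweeps (objective: simpler, same O(n log n) cost).

-- ===== PORT A =====
-- the body of A's bucketing for-loop; state = (positive, negative, zero, answer)
def aStep (acc : List Int × List Int × Int × Int) (num : Int) : List Int × List Int × Int × Int :=
  let (positive, negative, zero, answer) := acc
  if num = 1 then (positive, negative, zero, answer + 1)
  else if num = 0 then (positive, negative, zero + 1, answer)
  else if num > 1 then (positive ++ [num], negative, zero, answer)
  else (positive, negative ++ [num], zero, answer)

-- A's 'while positive' pops two largest from the end of the ascending list:
-- transcribed as consuming the reversed list from the front
def posWhile : List Int → Int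
  | [] => 0
  | [x] => x
  | x :: y :: rest => x * y + posWhile rest

-- A's 'while negative' pops two most-negative from the end of the descending list
def negWhile : List Int → Int → Int
  | [], _ => 0
  | [x], zero => if zero ≠ 0 then 0 else x
  | x :: y :: rest, zero => x * y + negWhile rest zero

def solution (n : Int) (nums : List Int) : Int :=
  let st := nums.foldl aStep (([] : List Int), ([] : List Int), (0 : Int), (0 : Int))
  let positive := PySem.List.sorted st.1 (fun x => x) false
  let negative := PySem.List.sorted st.2.1 (fun x => x) true
  st.2.2.2 + posWhile positive.reverse + negWhile negative.reverse st.2.2.1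

-- ===== PORT B =====
-- Source B's first while loop (cursor i walking right): the cursor walk is transcribed as
-- consuming adjacent negative pairs from the front of the remainder; returns (sum, rest)
def bNegLoop : List Int → Int × List Int
  | x :: y :: rest =>
    if y < 0 then
      let p := bNegLoop rest
      (x * y + p.1, p.2)
    else (0, x :: y :: rest)
  | t => (0, t)

-- Source B's second while loop (cursor j walking left from the end): transcribed as consuming
-- adjacent pairs of values > 1 from the front of the reversed remainder
def bPosLoop : List Int → Int × List Int
  | x :: y :: rest =>
    if y > 1 then
      let p := bPosLoop rest
      (x * y + p.1, p.2)
    else (0, x :: y :: rest)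
  | t => (0, t)

-- Source B's "if i < m and s[i] < 0" step: neutralise (zero present) or add the lone leftover negative
def bLone (hz : Bool) (t : List Int) : Int × List Int :=
  match t with
  | x :: r => if x < 0 then ((if hz then 0 else x), r) else (0, x :: r)
  | [] => (0, [])

-- Source B's "if j >= i and s[j] > 1" step: add the lone leftover value > 1
def bFinal (t : List Int) : Int :=
  match t with
  | x :: _ => if x > 1 then x else 0
  | [] => 0

def solution_alt (n : Int) (nums : List Int) : Int :=
  let s := PySem.List.sorted nums (fun x => x) false
  let p1 := bNegLoop s
  let p2 := bLone (s.contains 0) p1.2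
  let p3 := bPosLoop p2.2.reverse
  p1.1 + p2.1 + p3.1 + bFinal p3.2 + (PySem.List.count s 1 : Int)

-- ===== PRECONDITION & SPEC =====
def Spec_solution (n : Int) (nums : List Int) (out : Int) : Prop := out = solution_alt n nums
instance (n : Int) (nums : List Int) (out : Int) : Decidable (Spec_solution n nums out) := by unfold Spec_solution; infer_instance

-- ===== CLAIM (what is proved, stated in full; the proofs are below) =====
def Claim_equal_solution : Prop := ∀ (n : Int) (nums : List Int), Dom_solution n nums → Spec_solution n nums (solution n nums)

-- ===== LEMMAS AND PROOFS =====

-- proof-only helpers: pair-product sum and (≤ 1 element) remainder of a two-step sweep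
def pairs : List Int → Int
  | x :: y :: rest => x * y + pairs rest
  | _ => 0

def rest2 : List Int → List Int
  | _ :: _ :: rest => rest2 rest
  | t => t

theorem fold_eq (l : List Int) (p m : List Int) (zc ac : Int) :
    l.foldl aStep (p, m, zc, ac) =
      (p ++ l.filter (fun x => decide (1 < x)),
       m ++ l.filter (fun x => decide (x < 0)),
       zc + (l.count 0 : Int), ac + (l.count 1 : Int)) := by
  induction l generalizing p m zc ac with
  | nil => simp
  | cons x l ih =>
    by_cases h1 : x = 1
    · subst h1
      simp [List.foldl_cons, aStep, ih]
      push_cast; ring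
    · by_cases h0 : x = 0
      · subst h0
        simp [List.foldl_cons, aStep, ih]
        push_cast; ring
      · by_cases hp : 1 < x
        · simp [List.foldl_cons, aStep, h1, h0, hp, ih, show ¬ x < 0 by omega]
        · have hn : x < 0 := by omega
          simp [List.foldl_cons, aStep, h1, h0, hp, ih, hn]

theorem count_filter_false {a : Int} {p : Int → Bool} (l : List Int) (hp : p a = false) :
    List.count a (l.filter p) = 0 :=
  List.count_eq_zero.mpr (by simp [List.mem_filter, hp])

theorem count_filter_true {a : Int} {p : Int → Bool} (l : List Int) (hp : p a = true) :
    List.count a (l.filter p) = List.count a l := by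
  induction l with
  | nil => rfl
  | cons x l ih =>
    by_cases hx : x = a
    · subst hx; simp [List.filter_cons, hp, ih]
    · by_cases hpx : p x = true
      · simp [List.filter_cons, hpx, hx, ih]
      · simp [List.filter_cons, hpx, hx, ih]

theorem perm_decomp (l : List Int) :
    l.Perm (l.filter (fun x => decide (x < 0)) ++ (List.replicate (l.count 0) 0 ++
      (List.replicate (l.count 1) 1 ++ l.filter (fun x => decide (1 < x))))) := by
  rw [List.perm_iff_count]
  intro a
  simp only [List.count_append, List.count_replicate]
  by_cases hn : a < 0
  · rw [count_filter_true l (by simp [hn]), count_filter_false l (by simp; omega)]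
    simp [show ¬ (0 = a) by omega, show ¬ (1 = a) by omega]
  · by_cases hp : 1 < a
    · rw [count_filter_false l (by simp; omega), count_filter_true l (by simp [hp])]
      simp [show ¬ (0 = a) by omega, show ¬ (1 = a) by omega]
    · rw [count_filter_false l (by simp; omega), count_filter_false l (by simp; omega)]
      by_cases h0 : a = 0
      · subst h0; simp
      · by_cases h1 : a = 1
        · subst h1; simp
        · simp [show ¬ (0 = a) by omega, show ¬ (1 = a) by omega,
            List.count_eq_zero.mpr (fun hmem => by
              rcases (by omega : a < 0 ∨ a = 0 ∨ a = 1 ∨ 1 < a) with h|h|h|h <;> simp_all)]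

theorem sorted_decomp (nums : List Int) :
    PySem.List.sorted nums (fun x => x) false =
      PySem.List.sorted (nums.filter (fun x => decide (x < 0))) (fun x => x) false ++
      (List.replicate (nums.count 0) 0 ++ (List.replicate (nums.count 1) 1 ++
       PySem.List.sorted (nums.filter (fun x => decide (1 < x))) (fun x => x) false)) := by
  apply PySem.List.sorted_id_eq_of_perm_of_pairwise
  · refine List.Perm.trans ?_ (perm_decomp nums).symm
    refine List.Perm.append (PySem.List.sorted_perm _ _ _) ?_
    refine List.Perm.append (List.Perm.refl _) ?_
    exact List.Perm.append (List.Perm.refl _) (PySem.List.sorted_perm _ _ _)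
  · have hneg : ∀ x ∈ PySem.List.sorted (nums.filter (fun x => decide (x < 0))) (fun x => x) false, x < 0 := by
      intro x hx
      rw [PySem.List.mem_sorted] at hx
      simpa using (List.mem_filter.mp hx).2
    have hpos : ∀ x ∈ PySem.List.sorted (nums.filter (fun x => decide (1 < x))) (fun x => x) false, 1 < x := by
      intro x hx
      rw [PySem.List.mem_sorted] at hx
      simpa using (List.mem_filter.mp hx).2
    rw [List.pairwise_append]
    refine ⟨by simpa using PySem.List.sorted_pairwise _ _, ?_, ?_⟩
    · rw [List.pairwise_append]
      refine ⟨List.pairwise_replicate.mpr (by simp), ?_, ?_⟩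
      · rw [List.pairwise_append]
        refine ⟨List.pairwise_replicate.mpr (by simp), by simpa using PySem.List.sorted_pairwise _ _, ?_⟩
        · intro a ha b hb
          have := List.eq_of_mem_replicate ha
          have := hpos b hb; omega
      · intro a ha b hb
        have := List.eq_of_mem_replicate ha
        rcases List.mem_append.mp hb with hb | hb
        · have := List.eq_of_mem_replicate hb; omega
        · have := hpos b hb; omega
    · intro a ha b hb
      have h1 := hneg a ha
      rcases List.mem_append.mp hb with hb | hb
      · have := List.eq_of_mem_replicate hb; omega
      · rcases List.mem_append.mp hb with hb | hb
        · have := List.eq_of_mem_replicate hb; omega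
        · have := hpos b hb; omega

theorem rev_sorted_rev (l : List Int) :
    (PySem.List.sorted l (fun x => x) true).reverse = PySem.List.sorted l (fun x => x) false := by
  symm
  apply PySem.List.sorted_id_eq_of_perm_of_pairwise
  · exact (List.reverse_perm _).trans (PySem.List.sorted_perm _ _ _)
  · rw [List.pairwise_reverse]
    simpa using PySem.List.sorted_pairwise_rev l (fun x => x)

theorem bNegLoop_eq (l mid : List Int) (hl : ∀ x ∈ l, x < 0) (hmid : ∀ x ∈ mid, 0 ≤ x) :
    bNegLoop (l ++ mid) = (pairs l, rest2 l ++ mid) := by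
  induction l using posWhile.induct with
  | case1 =>
    simp only [List.nil_append, pairs, rest2]
    match mid, hmid with
    | [], _ => rfl
    | [x], _ => rfl
    | x :: y :: rest, h =>
      have : ¬ y < 0 := by have := h y (by simp); omega
      simp [bNegLoop, this]
  | case2 x =>
    simp only [List.cons_append, List.nil_append]
    match mid, hmid with
    | [], _ => rfl
    | m :: rest, h =>
      have : ¬ m < 0 := by have := h m (by simp); omega
      simp [bNegLoop, this, pairs, rest2]
  | case3 x y rest ih =>
    have hy : y < 0 := hl y (by simp)
    have ih' := ih (fun a ha => hl a (by simp [ha]))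
    simp [bNegLoop, hy, ih', pairs, rest2]

theorem bPosLoop_eq (l mid : List Int) (hl : ∀ x ∈ l, 1 < x) (hmid : ∀ x ∈ mid, x ≤ 1) :
    bPosLoop (l ++ mid) = (pairs l, rest2 l ++ mid) := by
  induction l using posWhile.induct with
  | case1 =>
    simp only [List.nil_append, pairs, rest2]
    match mid, hmid with
    | [], _ => rfl
    | [x], _ => rfl
    | x :: y :: rest, h =>
      have : ¬ y > 1 := by have := h y (by simp); omega
      simp [bPosLoop, this]
  | case2 x =>
    simp only [List.cons_append, List.nil_append]
    match mid, hmid with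
    | [], _ => rfl
    | m :: rest, h =>
      have : ¬ m > 1 := by have := h m (by simp); omega
      simp [bPosLoop, this, pairs, rest2]
  | case3 x y rest ih =>
    have hy : 1 < y := hl y (by simp)
    have ih' := ih (fun a ha => hl a (by simp [ha]))
    simp [bPosLoop, hy, ih', pairs, rest2]

theorem rest2_cases (l : List Int) : rest2 l = [] ∨ ∃ x, rest2 l = [x] ∧ x ∈ l := by
  induction l using posWhile.induct with
  | case1 => left; rfl
  | case2 x => right; exact ⟨x, rfl, by simp⟩
  | case3 x y rest ih =>
    rcases ih with h | ⟨a, h, hm⟩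
    · left; simpa [rest2] using h
    · right; exact ⟨a, by simpa [rest2] using h, by simp [hm]⟩

theorem negWhile_eq (l : List Int) (z : Int) :
    negWhile l z = pairs l + (match rest2 l with
      | [x] => if z ≠ 0 then 0 else x
      | _ => 0) := by
  induction l using posWhile.induct with
  | case1 => simp [negWhile, pairs, rest2]
  | case2 x => simp [negWhile, pairs, rest2]
  | case3 x y rest ih => simp [negWhile, pairs, rest2, ih]; ring

theorem posWhile_eq (l : List Int) :
    posWhile l = pairs l + (match rest2 l with
      | [x] => x
      | _ => 0) := by
  induction l using posWhile.induct with
  | case1 => simp [posWhile, pairs, rest2]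
  | case2 x => simp [posWhile, pairs, rest2]
  | case3 x y rest ih => simp [posWhile, pairs, rest2, ih]; ring

theorem bLone_ge (hz : Bool) (t : List Int) (h : ∀ x ∈ t, (0:Int) ≤ x) : bLone hz t = (0, t) := by
  cases t with
  | nil => rfl
  | cons x r =>
    have := h x (by simp)
    simp [bLone, show ¬ x < 0 by omega]

theorem bLone_neg (hz : Bool) (a : Int) (t : List Int) (ha : a < 0) :
    bLone hz (a :: t) = ((if hz then 0 else a), t) := by simp [bLone, ha]

theorem bFinal_le (t : List Int) (h : ∀ x ∈ t, x ≤ (1:Int)) : bFinal t = 0 := by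
  cases t with
  | nil => rfl
  | cons x r =>
    have := h x (by simp)
    simp [bFinal, show ¬ x > 1 by omega]

theorem bFinal_gt (a : Int) (t : List Int) (ha : 1 < a) : bFinal (a :: t) = a := by
  simp [bFinal]; omega

theorem main_eq (n : Int) (nums : List Int) : solution n nums = solution_alt n nums := by
  have hneg : ∀ x ∈ PySem.List.sorted (nums.filter (fun x => decide (x < 0))) (fun x => x) false, x < 0 := by
    intro x hx
    rw [PySem.List.mem_sorted] at hx
    simpa using (List.mem_filter.mp hx).2
  have hpos : ∀ x ∈ PySem.List.sorted (nums.filter (fun x => decide (1 < x))) (fun x => x) false, 1 < x := by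
    intro x hx
    rw [PySem.List.mem_sorted] at hx
    simpa using (List.mem_filter.mp hx).2
  have hmid : ∀ x ∈ (List.replicate (nums.count 0) 0 ++ (List.replicate (nums.count 1) 1 ++
       PySem.List.sorted (nums.filter (fun x => decide (1 < x))) (fun x => x) false)), (0:Int) ≤ x := by
    intro x hx
    rcases List.mem_append.mp hx with h | h
    · have := List.eq_of_mem_replicate h; omega
    · rcases List.mem_append.mp h with h | h
      · have := List.eq_of_mem_replicate h; omega
      · have := hpos x h; omega
  have hmid' : ∀ x ∈ (List.replicate (nums.count 1) 1 ++ List.replicate (nums.count 0) 0), x ≤ (1:Int) := by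
    intro x hx
    rcases List.mem_append.mp hx with h | h
    · have := List.eq_of_mem_replicate h; omega
    · have := List.eq_of_mem_replicate h; omega
  have hrev : ∀ x ∈ (PySem.List.sorted (nums.filter (fun x => decide (1 < x))) (fun x => x) false).reverse, (1:Int) < x := by
    intro x hx; exact hpos x (List.mem_reverse.mp hx)
  have hcon : (PySem.List.sorted nums (fun x => x) false).contains 0 = decide (nums.count 0 ≠ 0) := by
    by_cases h : nums.count 0 = 0
    · simp [h, PySem.List.mem_sorted, List.count_eq_zero.mp h]
    · have : (0:Int) ∈ nums := by
        by_contra hmem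
        exact h (List.count_eq_zero.mpr hmem)
      simp [h, PySem.List.mem_sorted, this]
  have hcnt : PySem.List.count (PySem.List.sorted nums (fun x => x) false) 1 = nums.count 1 := by
    rw [PySem.List.count_eq]
    exact (PySem.List.sorted_perm _ _ _).count_eq 1
  have hA : solution n nums = (nums.count 1 : Int) +
      posWhile (PySem.List.sorted (nums.filter (fun x => decide (1 < x))) (fun x => x) false).reverse +
      negWhile (PySem.List.sorted (nums.filter (fun x => decide (x < 0))) (fun x => x) false) (nums.count 0 : Int) := by
    simp only [solution, fold_eq, List.nil_append, zero_add, rev_sorted_rev]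
  rw [hA]
  simp only [solution_alt, hcon, hcnt]
  rw [sorted_decomp nums, bNegLoop_eq _ _ hneg hmid]
  rw [negWhile_eq, posWhile_eq]
  rcases rest2_cases (PySem.List.sorted (nums.filter (fun x => decide (x < 0))) (fun x => x) false) with hr | ⟨a, hr, ham⟩
  · rw [hr]
    simp only [List.nil_append]
    rw [bLone_ge _ _ hmid]
    simp only [List.reverse_append, List.reverse_replicate, List.append_assoc]
    rw [bPosLoop_eq _ _ hrev hmid']
    rcases rest2_cases ((PySem.List.sorted (nums.filter (fun x => decide (1 < x))) (fun x => x) false).reverse) with hq | ⟨b, hq, hbm⟩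
    · rw [hq]
      simp only [List.nil_append]
      rw [bFinal_le _ hmid']
      ring
    · rw [hq]
      simp only [List.cons_append]
      rw [bFinal_gt _ _ (hrev b hbm)]
      ring
  · rw [hr]
    simp only [List.cons_append, List.nil_append]
    rw [bLone_neg _ _ _ (hneg a ham)]
    simp only [List.reverse_append, List.reverse_replicate, List.append_assoc]
    rw [bPosLoop_eq _ _ hrev hmid']
    rcases rest2_cases ((PySem.List.sorted (nums.filter (fun x => decide (1 < x))) (fun x => x) false).reverse) with hq | ⟨b, hq, hbm⟩
    · rw [hq]
      simp only [List.nil_append]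
      rw [bFinal_le _ hmid']
      by_cases hz : nums.count 0 = 0
      · simp [hz]; ring
      · simp [hz]; ring
    · rw [hq]
      simp only [List.cons_append]
      rw [bFinal_gt _ _ (hrev b hbm)]
      by_cases hz : nums.count 0 = 0
      · simp [hz]; ring
      · simp [hz]; ring

-- ===== VERDICT (by name: the statement is the Claim_ definition above) =====
theorem solution_spec : Claim_equal_solution := by
  unfold Claim_equal_solution
  intro n nums _
  unfold Spec_solution
  exact main_eq n nums
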